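-- pv_equiv track=rewrite | github.com/coder-eb/ds-python | problems/practice.py | longest_consecutive_sequence_by_order
-- ===== SOURCE A (Python) =====
-- def longest_consecutive_sequence_by_order(nums):
--     if not len(nums): return 0
--
--     prev_num = nums[0]
--     longest_seq = current_seq = 1
--     for index in range(1, len(nums)):
--         current_num = nums[index]
--
--         if ((current_num - 1 == prev_num) or (current_num == prev_num)):
--             current_seq += 1
--         else:
--             current_seq = 1
--         longest_seq = max(current_seq, longest_seq)
--         prev_num = current_num
--     return longest_seq
-- ===== SOURCE B (Python) =====
-- def longest_consecutive_sequence_by_order(nums):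
--     n = len(nums)
--     if n == 0:
--         return 0
--     breaks = [i for i in range(1, n)
--               if not (nums[i] == nums[i - 1] or nums[i] - 1 == nums[i - 1])]
--     bounds = [0] + breaks + [n]
--     return max(b - a for a, b in zip(bounds, bounds[1:]))
-- ===== Notes on version B (the rewrite author's own statement) =====
-- stated objective: alternative
-- what changed: B replaces A's fused running-counter loop by a boundary/gap computation: it collects the break indices where the equal-or-successor relation between adjacent elements fails, forms the boundary list of 0, the breaks, and n, and returns the maximum difference between consecutive boundaries; A instead maintains prev/current/longest counters in one pass.
import Mathlib
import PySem

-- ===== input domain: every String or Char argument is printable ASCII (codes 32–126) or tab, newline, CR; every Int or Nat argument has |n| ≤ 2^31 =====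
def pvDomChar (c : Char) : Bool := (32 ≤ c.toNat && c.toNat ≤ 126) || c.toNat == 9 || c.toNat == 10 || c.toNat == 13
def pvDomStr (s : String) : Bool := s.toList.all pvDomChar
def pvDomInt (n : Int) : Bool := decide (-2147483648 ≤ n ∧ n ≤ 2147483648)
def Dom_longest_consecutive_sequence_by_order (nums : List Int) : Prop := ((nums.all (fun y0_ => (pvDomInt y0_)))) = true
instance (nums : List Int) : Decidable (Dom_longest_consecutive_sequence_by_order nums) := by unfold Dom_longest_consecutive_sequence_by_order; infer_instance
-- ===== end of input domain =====

-- B replaces A's fused running-counter loop by a boundary computation: it lists the break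
-- positions where the equal-or-successor relation fails, and returns the largest gap between
-- consecutive boundaries (alternative decomposition, same O(n) cost).

-- ===== PORT A =====
-- A's for-loop over range(1, len(nums)) with state (prev_num, current_seq, longest_seq)
def lcsGoA (xs : List Int) (prev_num current_seq longest_seq : Int) : Int :=
  match xs with
  | [] => longest_seq
  | current_num :: rest =>
      let current_seq' := if (current_num - 1 == prev_num) || (current_num == prev_num)
                          then current_seq + 1 else 1
      lcsGoA rest current_num current_seq' (max current_seq' longest_seq)

def longest_consecutive_sequence_by_order (nums : List Int) : Int :=
  match nums with
  | [] => 0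
  | x :: xs => lcsGoA xs x 1 1

-- ===== PORT B =====
-- breaks = [i for i in range(1, n) if not (nums[i] == nums[i-1] or nums[i] - 1 == nums[i-1])]
-- (indices produced by range(1, n) are always in range, so nums[i] is pyGetD with default 0)
def lcsBreaks (nums : List Int) : List Int :=
  (PySem.List.pyRange 1 nums.length).filter
    (fun i => ! ((PySem.List.pyGetD nums i 0 == PySem.List.pyGetD nums (i - 1) 0)
               || (PySem.List.pyGetD nums i 0 - 1 == PySem.List.pyGetD nums (i - 1) 0)))

def longest_consecutive_sequence_by_order_alt (nums : List Int) : Int :=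
  let n : Int := nums.length
  if n == 0 then 0
  else
    let bounds : List Int := 0 :: (lcsBreaks nums ++ [n])
    let gaps : List Int := (bounds.zip bounds.tail).map (fun ab => ab.2 - ab.1)
    -- max(gen) over the (always nonempty) gaps; Python max with no key
    (PySem.List.max? gaps (fun y => y)).getD 0

-- ===== PRECONDITION & SPEC =====
def Spec_longest_consecutive_sequence_by_order (nums : List Int) (out : Int) : Prop := out = longest_consecutive_sequence_by_order_alt nums
instance (nums : List Int) (out : Int) : Decidable (Spec_longest_consecutive_sequence_by_order nums out) := by unfold Spec_longest_consecutive_sequence_by_order; infer_instance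

-- ===== CLAIM (what is proved, stated in full; the proofs are below) =====
def Claim_equal_longest_consecutive_sequence_by_order : Prop := ∀ (nums : List Int), Dom_longest_consecutive_sequence_by_order nums → Spec_longest_consecutive_sequence_by_order nums (longest_consecutive_sequence_by_order nums)

-- ===== LEMMAS AND PROOFS =====

-- Proof-side intermediate: the lengths of the maximal related segments of prev :: xs,
-- with cur elements of the current segment already seen.
def lcsSegs (prev : Int) (xs : List Int) (cur : Int) : List Int :=
  match xs with
  | [] => [cur]
  | x :: rest => if (x == prev) || (x - 1 == prev)
                 then lcsSegs x rest (cur + 1)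
                 else cur :: lcsSegs x rest 1

-- Proof-side intermediate: the break positions of prev :: xs, the next element having index i.
def lcsBrk (prev : Int) (xs : List Int) (i : Int) : List Int :=
  match xs with
  | [] => []
  | x :: rest => if (x == prev) || (x - 1 == prev)
                 then lcsBrk x rest (i + 1)
                 else i :: lcsBrk x rest (i + 1)

def lcsGaps (l : List Int) : List Int := (l.zip l.tail).map (fun ab => ab.2 - ab.1)

def lcsMaxI (l : List Int) : Int :=
  match l with
  | [] => 0
  | a :: t => t.foldl max a

theorem lcsSegs_ne_nil (xs : List Int) (prev cur : Int) : lcsSegs prev xs cur ≠ [] := by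
  cases xs with
  | nil => simp [lcsSegs]
  | cons x rest => unfold lcsSegs; split <;> simp_all [lcsSegs_ne_nil rest]

theorem lcsMaxI_cons (c : Int) (s : List Int) (hs : s ≠ []) :
    lcsMaxI (c :: s) = max c (lcsMaxI s) := by
  cases s with
  | nil => exact absurd rfl hs
  | cons a t =>
      show List.foldl max c (a :: t) = max c (t.foldl max a)
      rw [List.foldl_cons]
      exact List.foldl_assoc

theorem le_lcsMaxI_segs (xs : List Int) : ∀ prev cur : Int, cur ≤ lcsMaxI (lcsSegs prev xs cur) := by
  induction xs with
  | nil => intro prev cur; simp [lcsSegs, lcsMaxI]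
  | cons x rest ih =>
      intro prev cur
      unfold lcsSegs
      split
      · exact le_trans (by omega) (ih x (cur + 1))
      · rw [lcsMaxI_cons _ _ (lcsSegs_ne_nil rest x 1)]; omega

-- A's loop computes the max of longest_seq and the segment lengths still ahead.
theorem lcsGoA_eq_segs (xs : List Int) : ∀ prev cs bs : Int, cs ≤ bs →
    lcsGoA xs prev cs bs = max bs (lcsMaxI (lcsSegs prev xs cs)) := by
  induction xs with
  | nil => intro prev cs bs h; simp [lcsGoA, lcsSegs, lcsMaxI]; omega
  | cons x rest ih =>
      intro prev cs bs h
      unfold lcsGoA lcsSegs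
      have hrel : ((x - 1 == prev) || (x == prev)) = ((x == prev) || (x - 1 == prev)) :=
        Bool.or_comm _ _
      rw [hrel]
      split
      · rw [ih x (cs + 1) (max (cs + 1) bs) (le_max_left _ _)]
        have := le_lcsMaxI_segs rest x (cs + 1)
        omega
      · rw [ih x 1 (max 1 bs) (le_max_left _ _),
            lcsMaxI_cons _ _ (lcsSegs_ne_nil rest x 1)]
        have := le_lcsMaxI_segs rest x 1
        omega

theorem lcsGaps_cons_cons (a b : Int) (t : List Int) :
    lcsGaps (a :: b :: t) = (b - a) :: lcsGaps (b :: t) := by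
  simp [lcsGaps]

-- The gaps between consecutive boundaries are exactly the segment lengths.
theorem lcsGaps_brk (xs : List Int) : ∀ (prev i cur b : Int), b = i - cur →
    lcsGaps (b :: (lcsBrk prev xs i ++ [i + xs.length])) = lcsSegs prev xs cur := by
  induction xs with
  | nil => intro prev i cur b hb; subst hb; simp [lcsBrk, lcsGaps, lcsSegs]
  | cons x rest ih =>
      intro prev i cur b hb
      unfold lcsBrk lcsSegs
      split
      · have h1 : (i : Int) + (x :: rest).length = (i + 1) + rest.length := by
          simp; omega
        rw [h1, ih x (i + 1) (cur + 1) b (by omega)]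
      · have h1 : (i : Int) + (x :: rest).length = (i + 1) + rest.length := by
          simp; omega
        rw [h1, List.cons_append, lcsGaps_cons_cons,
            ih x (i + 1) 1 i (by omega)]
        congr 1
        omega

-- B's index filter over range(1, n) produces exactly the break positions.
theorem filter_pyRange_eq_brk (full : List Int) (p : Int → Bool)
    (hp : ∀ i : Int, p i = ! ((PySem.List.pyGetD full i 0 == PySem.List.pyGetD full (i - 1) 0)
               || (PySem.List.pyGetD full i 0 - 1 == PySem.List.pyGetD full (i - 1) 0))) :
    ∀ (xs : List Int) (k : Nat) (prev : Int), 1 ≤ k → full.drop k = xs →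
      full.getD (k - 1) 0 = prev →
      (PySem.List.pyRange (k : Int) (full.length : Int)).filter p = lcsBrk prev xs (k : Int) := by
  intro xs
  induction xs generalizing full with
  | nil =>
      intro k prev hk hdrop _
      have hlen : full.length ≤ k := List.drop_eq_nil_iff.mp hdrop
      have : PySem.List.pyRange (k : Int) (full.length : Int) = [] := by
        simp [PySem.List.pyRange]; omega
      simp [this, lcsBrk]
  | cons x rest ih =>
      intro k prev hk hdrop hprev
      have hklt : k < full.length := by
        by_contra hc
        rw [List.drop_eq_nil_iff.mpr (by omega)] at hdrop
        simp at hdrop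
      have hx : full.getD k 0 = x := by
        have hsome : full[k]? = some x := by
          have h0 : (full.drop k)[0]? = full[k + 0]? := List.getElem?_drop
          rw [hdrop] at h0
          simpa using h0.symm
        rw [List.getD_eq_getElem?_getD, hsome]
        rfl
      rw [PySem.List.pyRange_one_cons (by exact_mod_cast hklt)]
      rw [List.filter_cons]
      have hpk : p (k : Int) = ! ((x == prev) || (x - 1 == prev)) := by
        rw [hp]
        have e1 : PySem.List.pyGetD full (k : Int) 0 = x := by
          rw [PySem.List.pyGetD_natCast, hx]
        have e2 : PySem.List.pyGetD full ((k : Int) - 1) 0 = prev := by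
          have : ((k : Int) - 1) = ((k - 1 : Nat) : Int) := by omega
          rw [this, PySem.List.pyGetD_natCast, hprev]
        rw [e1, e2]
      have hdrop' : full.drop (k + 1) = rest := by
        have h1 : full.drop (k + 1) = (full.drop k).drop 1 := by
          rw [List.drop_drop, Nat.add_comm]
        rw [h1, hdrop]; rfl
      have hprev' : full.getD (k + 1 - 1) 0 = x := by simpa using hx
      have ihr := ih full hp (k + 1) x (by omega) hdrop' hprev'
      have hcast : ((k : Int) + 1) = ((k + 1 : Nat) : Int) := by omega
      unfold lcsBrk
      rw [hpk, hcast, ihr]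
      cases hb : ((x == prev) || (x - 1 == prev)) <;> simp

-- ===== VERDICT (by name: the statement is the Claim_ definition above) =====
theorem longest_consecutive_sequence_by_order_spec : Claim_equal_longest_consecutive_sequence_by_order := by
  intro nums _
  unfold Spec_longest_consecutive_sequence_by_order
  cases nums with
  | nil => rfl
  | cons x xs =>
      show lcsGoA xs x 1 1 = _
      have hbrk : lcsBreaks (x :: xs) = lcsBrk x xs (1 : Int) := by
        unfold lcsBreaks
        exact filter_pyRange_eq_brk (x :: xs) _ (fun i => rfl) xs 1 x (le_refl 1) rfl rfl
      have hlen : (((x :: xs).length : Int)) = (1 : Int) + xs.length := by simp; omega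
      have halt : longest_consecutive_sequence_by_order_alt (x :: xs)
          = (PySem.List.max? (lcsGaps ((0 : Int) :: (lcsBrk x xs 1 ++ [(1 : Int) + (xs.length : Int)]))) (fun y => y)).getD 0 := by
        unfold longest_consecutive_sequence_by_order_alt
        simp only [hbrk, hlen]
        have hn : (((1 : Int) + (xs.length : Int)) == 0) = false := by
          rw [beq_eq_false_iff_ne]
          omega
        simp only [hn, Bool.false_eq_true, if_false]
        rfl
      have hgaps :
          lcsGaps ((0 : Int) :: (lcsBrk x xs (1 : Int) ++ [(1 : Int) + (xs.length : Int)])) = lcsSegs x xs 1 :=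
        lcsGaps_brk xs x 1 1 0 (by omega)
      rw [halt, hgaps, lcsGoA_eq_segs xs x 1 1 (le_refl 1)]
      rcases hs : lcsSegs x xs 1 with _ | ⟨a, t⟩
      · exact absurd hs (lcsSegs_ne_nil xs x 1)
      · rw [PySem.List.max?_id_cons]
        have h1 := le_lcsMaxI_segs xs x 1
        rw [hs] at h1
        simp only [Option.getD_some]
        show max 1 (lcsMaxI (a :: t)) = _
        simp only [lcsMaxI] at h1 ⊢
        omega
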